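-- pv_equiv track=rewrite | github.com/graydays2386/korean-sentence-splitter | app/util/s_splitter/indices_splitter.py | _split_by_indices
-- ===== SOURCE A (Python) =====
-- from typing import List
--
-- def _split_by_indices(span: str, indices: List[int]) -> List[str]:
--     """
--     indices: span 내 char index (split 시작점).
--     *중요*: 어떤 경우에도 원문 재구성을 깨는 strip 제거.
--     """
--     if not indices:
--         return [span]
--
--     cuts = [0] + [i for i in indices if 0 < i < len(span)] + [len(span)]
--     cuts = sorted(set(cuts))
--
--     raw_pieces = [span[a:b] for a, b in zip(cuts, cuts[1:])]
--
--     # 공백만 있는 조각은 앞 조각에 붙여 재구성을 안정화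
--     out: List[str] = []
--     for p in raw_pieces:
--         if not out:
--             out.append(p)
--             continue
--         if p.strip() == "":
--             out[-1] = out[-1] + p
--         else:
--             out.append(p)
--
--     return out
-- ===== SOURCE B (Python) =====
-- from typing import List
--
-- def _split_by_indices(span: str, indices: List[int]) -> List[str]:
--     if not indices:
--         return [span]
--
--     cuts = sorted({i for i in indices if 0 < i < len(span)})
--     stops = cuts + [len(span)]
--
--     # A cut opens a new piece only if its segment has visible content;
--     # whitespace-only segments stay attached to the piece before them.
--     starts = [0] + [c for c, nxt in zip(cuts, stops[1:]) if span[c:nxt].strip()]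
--     ends = starts[1:] + [len(span)]
--     return [span[x:y] for x, y in zip(starts, ends)]
-- ===== Notes on version B (the rewrite author's own statement) =====
-- stated objective: simpler
-- what changed: B keeps A's cut computation but replaces slice-then-concatenate merging with a single pass that collects the output start positions (a cut opens a piece iff its segment is not whitespace-only) and slices the span once per output piece; Pre_ excludes the empty span with nonempty indices, where A's [] and B's [''] are equally defensible values for splitting the empty string.
-- outside the precondition, e.g. on _split_by_indices('', [1]): A returns [], B returns ['']
import Mathlib
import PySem

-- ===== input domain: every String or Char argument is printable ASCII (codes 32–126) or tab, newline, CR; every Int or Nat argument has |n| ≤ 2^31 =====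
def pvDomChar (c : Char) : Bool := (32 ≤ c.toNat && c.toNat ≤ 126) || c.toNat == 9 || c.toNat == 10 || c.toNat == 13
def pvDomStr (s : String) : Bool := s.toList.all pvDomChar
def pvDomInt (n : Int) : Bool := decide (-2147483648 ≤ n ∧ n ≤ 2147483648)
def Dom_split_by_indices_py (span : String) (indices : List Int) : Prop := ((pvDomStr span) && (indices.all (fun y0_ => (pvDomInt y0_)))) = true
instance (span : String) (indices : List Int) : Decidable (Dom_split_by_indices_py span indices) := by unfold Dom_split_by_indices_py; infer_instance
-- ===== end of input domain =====

-- B keeps A's cut computation but collects the output start positions in one pass (a cut opens a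
-- piece iff its segment is not whitespace-only) and slices the span once per output piece, instead
-- of slicing every raw segment and concatenating whitespace-only ones onto the previous piece.

-- ===== PORT A =====
-- the merging loop body of A: if not out: append; elif p.strip() == "": out[-1] += p; else: append
def pvAStep (out : List (List Char)) (p : List Char) : List (List Char) :=
  if out = [] then out ++ [p]
  else if PySem.Chars.strip p = [] then out.dropLast ++ [out.getLastD [] ++ p]
  else out ++ [p]

def split_by_indices_py (span : String) (indices : List Int) : List String :=
  if indices = [] then [span]
  else
    let s := span.toList
    let n : Int := (s.length : Int)
    let cuts := PySem.List.sorted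
      (PySem.Set.ofList ([0] ++ indices.filter (fun i => decide (0 < i) && decide (i < n)) ++ [n]))
      (fun x => x) false
    let raw_pieces := (cuts.zip cuts.tail).map (fun ab => PySem.List.slice s (some ab.1) (some ab.2))
    (raw_pieces.foldl pvAStep []).map String.ofList

-- ===== PORT B =====
def split_by_indices_py_alt (span : String) (indices : List Int) : List String :=
  if indices = [] then [span]
  else
    let s := span.toList
    let n : Int := (s.length : Int)
    let cuts := PySem.List.sorted
      (PySem.Set.ofList (indices.filter (fun i => decide (0 < i) && decide (i < n))))
      (fun x => x) false
    let stops := cuts ++ [n]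
    let starts := [(0 : Int)] ++ (cuts.zip stops.tail).filterMap
      (fun cn => if PySem.Chars.strip (PySem.List.slice s (some cn.1) (some cn.2)) ≠ []
                 then some cn.1 else none)
    let ends := starts.tail ++ [n]
    (starts.zip ends).map (fun xy => String.ofList (PySem.List.slice s (some xy.1) (some xy.2)))

-- ===== PRECONDITION & SPEC =====
-- Pre_ excludes the empty span with nonempty indices: there A returns [] and B returns [""] —
-- two equally defensible renderings of splitting the empty string, which no caller would specify.
def Pre_split_by_indices_py (span : String) (indices : List Int) : Prop :=
  span = "" → indices = []
instance (span : String) (indices : List Int) : Decidable (Pre_split_by_indices_py span indices) := by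
  unfold Pre_split_by_indices_py; infer_instance

def pvWitness_split_by_indices_py : String × List Int := ("ab cd", [2])

def Spec_split_by_indices_py (span : String) (indices : List Int) (out : List String) : Prop := out = split_by_indices_py_alt span indices
instance (span : String) (indices : List Int) (out : List String) : Decidable (Spec_split_by_indices_py span indices out) := by unfold Spec_split_by_indices_py; infer_instance

-- ===== CLAIM (what is proved, stated in full; the proofs are below) =====
def Claim_equal_split_by_indices_py : Prop := ∀ (span : String) (indices : List Int), Dom_split_by_indices_py span indices → Pre_split_by_indices_py span indices → Spec_split_by_indices_py span indices (split_by_indices_py span indices)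

-- ===== LEMMAS AND PROOFS =====

-- slices of s over consecutive pairs of a boundary list
def pvZipSlices (s : List Char) (l : List Int) : List (List Char) :=
  (l.zip l.tail).map (fun ab => PySem.List.slice s (some ab.1) (some ab.2))

-- A's merge loop once the accumulator is nonempty, tracking the open last piece
def pvMergeA (s : List Char) (cur : List Char) : List (List Char) → List (List Char)
  | [] => [cur]
  | p :: ps => if PySem.Chars.strip p = [] then pvMergeA s (cur ++ p) ps else cur :: pvMergeA s p ps

-- A's boundary filter: a cut ≠ 0 is kept iff its segment is not whitespace-only
def pvCond (s : List Char) (ab : Int × Int) : Option Int :=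
  if ab.1 ≠ 0 ∧ PySem.Chars.strip (PySem.List.slice s (some ab.1) (some ab.2)) ≠ []
  then some ab.1 else none

theorem pvSliceConcat (s : List Char) (a b c : Int) (h0 : 0 ≤ a) (hab : a ≤ b) (hbc : b ≤ c) :
    PySem.List.slice s (some a) (some b) ++ PySem.List.slice s (some b) (some c)
      = PySem.List.slice s (some a) (some c) := by
  have hb0 : (0:Int) ≤ b := le_trans h0 hab
  have hc0 : (0:Int) ≤ c := le_trans hb0 hbc
  rw [PySem.List.slice_toNat s h0 hb0, PySem.List.slice_toNat s hb0 hc0,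
      PySem.List.slice_toNat s h0 hc0]
  have hab' : a.toNat ≤ b.toNat := Int.toNat_le_toNat hab
  have hbc' : b.toNat ≤ c.toNat := Int.toNat_le_toNat hbc
  have h : c.toNat - a.toNat = (b.toNat - a.toNat) + (c.toNat - b.toNat) := by omega
  rw [h, List.take_add, List.drop_drop]
  have h2 : a.toNat + (b.toNat - a.toNat) = b.toNat := by omega
  rw [h2]

theorem pvFoldA (s : List Char) (ps : List (List Char)) :
    ∀ (acc : List (List Char)) (cur : List Char),
    ps.foldl pvAStep (acc ++ [cur]) = acc ++ pvMergeA s cur ps := by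
  induction ps with
  | nil => intro acc cur; simp [pvMergeA]
  | cons p ps ih =>
    intro acc cur
    simp only [List.foldl_cons, pvMergeA]
    have hne : acc ++ [cur] ≠ [] := by simp
    by_cases hs : PySem.Chars.strip p = []
    · have : pvAStep (acc ++ [cur]) p = acc ++ [cur ++ p] := by
        simp [pvAStep, hne, hs]
      rw [this, ih acc (cur ++ p), if_pos hs]
    · have : pvAStep (acc ++ [cur]) p = (acc ++ [cur]) ++ [p] := by
        simp [pvAStep, hne, hs]
      rw [this, ih (acc ++ [cur]) p, if_neg hs]
      simp

-- the heart: merging whitespace-only raw pieces = keeping only the non-whitespace boundaries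
theorem pvCore (s : List Char) (cs : List Int) : ∀ (a b : Int),
    0 ≤ a → a ≤ b → 0 < b → (b :: cs).Pairwise (· < ·) →
    pvMergeA s (PySem.List.slice s (some a) (some b)) (pvZipSlices s (b :: cs))
      = pvZipSlices s ((a :: ((b :: cs).zip cs).filterMap (pvCond s)) ++ [(b :: cs).getLastD 0]) := by
  induction cs with
  | nil =>
    intro a b h0 hab hb hp
    simp [pvZipSlices, pvMergeA]
  | cons c cs ih =>
    intro a b h0 hab hb hp
    have hbc : b < c := (List.pairwise_cons.mp hp).1 c (by simp)
    have hp' : (c :: cs).Pairwise (· < ·) := (List.pairwise_cons.mp hp).2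
    have hzs : pvZipSlices s (b :: c :: cs)
        = PySem.List.slice s (some b) (some c) :: pvZipSlices s (c :: cs) := by
      simp [pvZipSlices]
    rw [hzs]
    have hfm : ((b :: c :: cs).zip (c :: cs)).filterMap (pvCond s)
        = (if PySem.Chars.strip (PySem.List.slice s (some b) (some c)) = [] then []
           else [b]) ++ ((c :: cs).zip cs).filterMap (pvCond s) := by
      simp only [List.zip_cons_cons, List.filterMap_cons, pvCond]
      split_ifs with h1 h2 <;> simp_all
    by_cases hs : PySem.Chars.strip (PySem.List.slice s (some b) (some c)) = []
    · rw [pvMergeA, if_pos hs,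
          pvSliceConcat s a b c h0 hab (le_of_lt hbc),
          ih a c h0 (le_trans hab (le_of_lt hbc)) (lt_trans hb hbc) hp']
      rw [hfm, if_pos hs]
      simp
    · rw [pvMergeA, if_neg hs,
          ih b c (le_of_lt hb) (le_of_lt hbc) (lt_trans hb hbc) hp']
      rw [hfm, if_neg hs]
      have : ((a :: ([b] ++ ((c :: cs).zip cs).filterMap (pvCond s))) ++ [(b :: c :: cs).getLastD 0])
          = a :: b :: (((c :: cs).zip cs).filterMap (pvCond s) ++ [(c :: cs).getLastD 0]) := by
        simp
      rw [this]
      have hz2 : ∀ (l : List Int), pvZipSlices s (a :: b :: l)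
          = PySem.List.slice s (some a) (some b) :: pvZipSlices s (b :: l) := by
        intro l; simp [pvZipSlices]
      rw [hz2]
      simp [pvZipSlices]

theorem pvGetLast (l : List Int) (x : Int) : ∀ (d : Int), l.Pairwise (· < ·) → x ∈ l →
    (∀ y ∈ l, y ≤ x) → l.getLastD d = x := by
  induction l with
  | nil => intro d _ hx _; simp at hx
  | cons h t ih =>
    intro d hp hx hub
    cases t with
    | nil => simp at hx; simp [hx]
    | cons c cs =>
      have hxt : x ∈ c :: cs := by
        rcases List.mem_cons.mp hx with rfl | hm
        · exfalso
          have := (List.pairwise_cons.mp hp).1 c (by simp)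
          have := hub c (by simp)
          omega
        · exact hm
      rw [List.getLastD_cons]
      exact ih h (List.pairwise_cons.mp hp).2 hxt (fun y hy => hub y (by simp [hy]))

theorem pvCutsFacts (n : Int) (idx : List Int) (hn : 0 ≤ n) :
    (PySem.List.sorted (PySem.Set.ofList
        ([0] ++ idx.filter (fun i => decide (0 < i) && decide (i < n)) ++ [n])) (fun x => x) false).Pairwise (· < ·)
    ∧ 0 ∈ (PySem.List.sorted (PySem.Set.ofList
        ([0] ++ idx.filter (fun i => decide (0 < i) && decide (i < n)) ++ [n])) (fun x => x) false)
    ∧ n ∈ (PySem.List.sorted (PySem.Set.ofList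
        ([0] ++ idx.filter (fun i => decide (0 < i) && decide (i < n)) ++ [n])) (fun x => x) false)
    ∧ ∀ x ∈ (PySem.List.sorted (PySem.Set.ofList
        ([0] ++ idx.filter (fun i => decide (0 < i) && decide (i < n)) ++ [n])) (fun x => x) false),
        0 ≤ x ∧ x ≤ n := by
  refine ⟨PySem.List.sorted_ofList_pairwise_lt _, ?_, ?_, ?_⟩
  · rw [PySem.List.mem_sorted, PySem.Set.mem_ofList]; simp
  · rw [PySem.List.mem_sorted, PySem.Set.mem_ofList]; simp
  · intro x hx
    rw [PySem.List.mem_sorted, PySem.Set.mem_ofList] at hx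
    simp only [List.mem_append, List.mem_filter, List.mem_singleton] at hx
    rcases hx with (hx | hx) | hx
    · omega
    · simp only [decide_eq_true_eq, Bool.and_eq_true] at hx
      obtain ⟨-, h1, h2⟩ := hx
      omega
    · omega

theorem pvMain (s : List Char) (cuts : List Int) (n : Int)
    (hpw : cuts.Pairwise (· < ·)) (h0m : 0 ∈ cuts) (hnm : n ∈ cuts)
    (hbd : ∀ x ∈ cuts, 0 ≤ x ∧ x ≤ n) :
    ((cuts.zip cuts.tail).map (fun ab => PySem.List.slice s (some ab.1) (some ab.2))).foldl pvAStep []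
    = (if 2 ≤ cuts.length then
        pvZipSlices s ((([(0:Int)] ++ (cuts.zip cuts.tail).filterMap (pvCond s)) ++ [n]))
       else []) := by
  cases cuts with
  | nil => simp at h0m
  | cons ch ct =>
    have hch : ch = 0 := by
      rcases List.mem_cons.mp h0m with h | h
      · omega
      · have h1 := (List.pairwise_cons.mp hpw).1 0 h
        have h2 := (hbd ch (by simp)).1
        omega
    subst hch
    cases ct with
    | nil => simp
    | cons c1 rest =>
      have hc1 : 0 < c1 := (List.pairwise_cons.mp hpw).1 c1 (by simp)
      have hpt : (c1 :: rest).Pairwise (· < ·) := (List.pairwise_cons.mp hpw).2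
      have hlen : 2 ≤ (0 :: c1 :: rest : List Int).length := by simp
      rw [if_pos hlen]
      have hnm' : n ∈ c1 :: rest := by
        rcases List.mem_cons.mp hnm with h | h
        · exfalso; have := (hbd c1 (by simp)); omega
        · exact h
      have hlast : (c1 :: rest).getLastD 0 = n :=
        pvGetLast (c1 :: rest) n 0 hpt hnm' (fun y hy => (hbd y (by simp [hy])).2)
      have hL : ((0 :: c1 :: rest : List Int).zip (0 :: c1 :: rest : List Int).tail).map
            (fun ab => PySem.List.slice s (some ab.1) (some ab.2))
          = PySem.List.slice s (some 0) (some c1) :: pvZipSlices s (c1 :: rest) := by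
        simp [pvZipSlices]
      rw [hL, List.foldl_cons]
      have hstep : pvAStep [] (PySem.List.slice s (some 0) (some c1))
          = [] ++ [PySem.List.slice s (some 0) (some c1)] := by simp [pvAStep]
      rw [hstep, pvFoldA s _ [] _, List.nil_append]
      rw [pvCore s rest 0 c1 le_rfl (le_of_lt hc1) hc1 hpt]
      have hfm : ((0 :: c1 :: rest : List Int).zip (0 :: c1 :: rest : List Int).tail).filterMap (pvCond s)
          = ((c1 :: rest).zip rest).filterMap (pvCond s) := by
        simp [pvCond]
      rw [hfm, hlast]
      simp

-- two strictly increasing lists with the same members are equal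
theorem pvStrictEq (l1 : List Int) : ∀ (l2 : List Int), l1.Pairwise (· < ·) → l2.Pairwise (· < ·) →
    (∀ x, x ∈ l1 ↔ x ∈ l2) → l1 = l2 := by
  induction l1 with
  | nil =>
    intro l2 _ _ hm
    cases l2 with
    | nil => rfl
    | cons b t2 => exact absurd ((hm b).mpr (by simp)) (by simp)
  | cons a t ih =>
    intro l2 h1 h2 hm
    cases l2 with
    | nil => exact absurd ((hm a).mp (by simp)) (by simp)
    | cons b t2 =>
      have hab : a = b := by
        have ha : a ∈ b :: t2 := (hm a).mp (by simp)
        have hb : b ∈ a :: t := (hm b).mpr (by simp)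
        rcases List.mem_cons.mp ha with h | h
        · exact h
        · have h1' := (List.pairwise_cons.mp h2).1 a h
          rcases List.mem_cons.mp hb with h' | h'
          · omega
          · have := (List.pairwise_cons.mp h1).1 b h'
            omega
      subst hab
      have ht : ∀ x, x ∈ t ↔ x ∈ t2 := by
        intro x
        constructor
        · intro hx
          have hax := (List.pairwise_cons.mp h1).1 x hx
          rcases List.mem_cons.mp ((hm x).mp (by simp [hx])) with h | h
          · omega
          · exact h
        · intro hx
          have hax := (List.pairwise_cons.mp h2).1 x hx
          rcases List.mem_cons.mp ((hm x).mpr (by simp [hx])) with h | h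
          · omega
          · exact h
      rw [ih t2 (List.pairwise_cons.mp h1).2 (List.pairwise_cons.mp h2).2 ht]

-- zipping a snoc list with its tail
theorem pvZipSnoc (l : List Int) (x : Int) :
    (l ++ [x]).zip ((l ++ [x]).tail) = l.zip (l.tail ++ [x]) := by
  induction l with
  | nil => rfl
  | cons a t ih =>
    cases t with
    | nil => rfl
    | cons b t' =>
      simp only [List.cons_append, List.tail_cons, List.zip_cons_cons] at *
      rw [ih]


-- A's pair list is B's pair list with a leading (0, ·) pair, which pvCond drops
theorem pvFEq (s : List Char) (n : Int) (L : List Int) (hpos : ∀ x ∈ L, x ≠ 0) :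
    ((0 :: (L ++ [n])).zip (L ++ [n])).filterMap (pvCond s)
      = (L.zip ((L ++ [n]).tail)).filterMap
          (fun cn => if PySem.Chars.strip (PySem.List.slice s (some cn.1) (some cn.2)) ≠ []
                     then some cn.1 else none) := by
  cases L with
  | nil => simp [pvCond]
  | cons b t =>
    have hz : (b :: (t ++ [n])).zip (t ++ [n]) = (b :: t).zip (t ++ [n]) := by
      have := pvZipSnoc (b :: t) n
      simpa using this
    simp only [List.cons_append, List.zip_cons_cons, List.filterMap_cons, List.tail_cons]
    rw [hz]
    have hb0 : pvCond s (0, b) = none := by simp [pvCond]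
    rw [hb0]
    apply List.filterMap_congr
    intro ab hab
    have h1 : ab.1 ∈ b :: t := by
      obtain ⟨x, y, rfl⟩ : ∃ x y, ab = (x, y) := ⟨ab.1, ab.2, rfl⟩
      exact (List.of_mem_zip hab).1
    have hne : ab.1 ≠ 0 := hpos ab.1 h1
    simp [pvCond, hne]

-- ===== VERDICT (by name: the statement is the Claim_ definition above) =====
theorem split_by_indices_py_spec : Claim_equal_split_by_indices_py := by
  intro span indices _ hpre
  unfold Spec_split_by_indices_py split_by_indices_py split_by_indices_py_alt
  by_cases hind : indices = []
  · simp [hind]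
  · simp only [if_neg hind]
    set s := span.toList with hsdef
    set n : Int := (s.length : Int) with hndef
    have hs_ne : s ≠ [] := by
      intro h
      exact hind (hpre (String.toList_eq_nil_iff.mp h))
    have hn1 : 1 ≤ n := by
      have : 0 < s.length := List.length_pos_iff.mpr hs_ne
      omega
    set filt := indices.filter (fun i => decide (0 < i) && decide (i < n)) with hfdef
    set cutsB := PySem.List.sorted (PySem.Set.ofList filt) (fun x => x) false with hcbdef
    have hBpw : cutsB.Pairwise (· < ·) := PySem.List.sorted_ofList_pairwise_lt _
    have hBmem : ∀ x, x ∈ cutsB ↔ x ∈ filt := by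
      intro x; rw [hcbdef, PySem.List.mem_sorted, PySem.Set.mem_ofList]
    have hBbd : ∀ x ∈ cutsB, 0 < x ∧ x < n := by
      intro x hx
      have := (hBmem x).mp hx
      rw [hfdef, List.mem_filter] at this
      have h2 := this.2
      simp only [decide_eq_true_eq, Bool.and_eq_true] at h2
      exact h2
    obtain ⟨hApw, h0m, hnm, hbd⟩ := pvCutsFacts n indices (by omega)
    -- A's sorted cut list is 0 :: cutsB ++ [n]
    have hAeq : PySem.List.sorted (PySem.Set.ofList ([0] ++ filt ++ [n])) (fun x => x) false
        = 0 :: (cutsB ++ [n]) := by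
      apply pvStrictEq _ _ (PySem.List.sorted_ofList_pairwise_lt _)
      · rw [List.pairwise_cons]
        refine ⟨?_, ?_⟩
        · intro x hx
          rcases List.mem_append.mp hx with h | h
          · exact (hBbd x h).1
          · simp at h; omega
        · rw [List.pairwise_append]
          refine ⟨hBpw, by simp, ?_⟩
          intro x hx y hy
          simp at hy
          subst hy
          exact (hBbd x hx).2
      · intro x
        rw [PySem.List.mem_sorted, PySem.Set.mem_ofList, List.mem_cons, List.mem_append,
            List.mem_append, List.mem_append, hBmem x]
        simp only [List.mem_singleton]
        tauto
    rw [hAeq] at hApw h0m hnm hbd ⊢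
    rw [pvMain s _ n hApw h0m hnm hbd, if_pos (by simp)]
    simp only [List.tail_cons]
    have hF := pvFEq s n cutsB (fun x hx => by have := hBbd x hx; omega)
    rw [hF]
    -- both sides now slice over the same boundary list
    unfold pvZipSlices
    rw [pvZipSnoc]
    simp [List.map_map, Function.comp]
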